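-- pv_equiv track=rewrite | github.com/Dudzian/Dudzian | scripts/run_cloud_service.py | _parse_backend_list
-- ===== SOURCE A (Python) =====
-- def _parse_backend_list(value: str | None) -> tuple[str, ...]:
--     if not value:
--         return ()
--     raw = value.strip().lower()
--     if not raw:
--         return ()
--     if raw == "all":
--         return ("all",)
--     items = [item.strip().lower() for item in value.replace(";", ",").split(",")]
--     expanded: list[str] = []
--     for item in items:
--         expanded.extend(part for part in item.split() if part)
--     return tuple(item for item in expanded if item)
-- ===== SOURCE B (Python) =====
-- def _parse_backend_list(value):
--     if not value:
--         return ()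
--     tokens = []
--     cur = []
--     for ch in value:
--         if ch in ",;" or ch.isspace():
--             if cur:
--                 tokens.append("".join(cur))
--                 cur = []
--         else:
--             cur.append(ch.lower())
--     if cur:
--         tokens.append("".join(cur))
--     return tuple(tokens)
-- ===== Notes on version B (the rewrite author's own statement) =====
-- stated objective: alternative
-- what changed: Replaces the layered passes (strip/lower, semicolon-to-comma replace, comma split, per-item strip/lower and whitespace split, two emptiness filters) with a single character-by-character scan that accumulates tokens over the combined delimiter class (comma, semicolon, whitespace), lowercasing as it goes.
import Mathlib
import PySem

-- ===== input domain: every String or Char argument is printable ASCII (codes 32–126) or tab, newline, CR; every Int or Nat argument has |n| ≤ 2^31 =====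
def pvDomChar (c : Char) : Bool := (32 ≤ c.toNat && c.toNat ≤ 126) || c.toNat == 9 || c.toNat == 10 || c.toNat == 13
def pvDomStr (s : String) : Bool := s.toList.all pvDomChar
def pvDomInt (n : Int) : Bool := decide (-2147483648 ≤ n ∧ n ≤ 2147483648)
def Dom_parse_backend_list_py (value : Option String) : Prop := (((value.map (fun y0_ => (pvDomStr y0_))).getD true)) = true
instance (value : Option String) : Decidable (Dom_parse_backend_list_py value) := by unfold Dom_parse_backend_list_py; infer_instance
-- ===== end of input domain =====

-- B replaces A's layered passes (semicolon-to-comma replace, comma split, per-item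
-- strip/lower and whitespace split, emptiness filters) with a single character scan over
-- the combined delimiter class (comma, semicolon, whitespace); alternative decomposition,
-- no speed claim.

-- ===== PORT A =====
def parse_backend_list_py (value : Option String) : List String :=
  match value with
  | none => []
  | some v =>
    if v = "" then []
    else
      let raw := PySem.Str.lower (PySem.Str.strip v)
      if raw = "" then []
      else if raw = "all" then ["all"]
      else
        let items := ((PySem.Str.split? (PySem.Str.replace v ";" ",") ",").getD []).map
          (fun item => PySem.Str.lower (PySem.Str.strip item))
        let expanded := items.foldl (fun acc item =>
          acc ++ (PySem.Str.split₀ item).filter (fun part => part ≠ "")) ([] : List String)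
        expanded.filter (fun item => item ≠ "")

-- ===== PORT B =====
def pvIsDelim (c : Char) : Bool := c == ',' || c == ';' || PySem.Chars.isspace c

def parse_backend_list_py_alt (value : Option String) : List String :=
  match value with
  | none => []
  | some v =>
    if v = "" then []
    else
      let fin := v.toList.foldl
        (fun (st : List String × List Char) ch =>
          if pvIsDelim ch then
            (if st.2 = [] then st else (st.1 ++ [String.ofList st.2], ([] : List Char)))
          else (st.1, st.2 ++ [PySem.Chars.lowerChar ch]))
        ([], [])
      if fin.2 = [] then fin.1 else fin.1 ++ [String.ofList fin.2]

-- ===== PRECONDITION & SPEC =====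
def Spec_parse_backend_list_py (value : Option String) (out : List String) : Prop := out = parse_backend_list_py_alt value
instance (value : Option String) (out : List String) : Decidable (Spec_parse_backend_list_py value out) := by unfold Spec_parse_backend_list_py; infer_instance

-- ===== CLAIM (what is proved, stated in full; the proofs are below) =====
def Claim_equal_parse_backend_list_py : Prop := ∀ (value : Option String), Dom_parse_backend_list_py value → Spec_parse_backend_list_py value (parse_backend_list_py value)

-- ===== LEMMAS AND PROOFS =====

-- comma-or-semicolon delimiters (A's first split level)
def pvIsCS (c : Char) : Bool := c == ',' || c == ';'

-- A's value.replace(";", ",") acts per character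
def pvSwap (c : Char) : Char := if c == ';' then ',' else c

-- reference tokenizer: split `l` on chars satisfying `p`, dropping empty runs;
-- `cur` is the current (reversed) partial token
def pvTok (p : Char → Bool) : List Char → List Char → List (List Char)
  | cur, [] => if cur = [] then [] else [cur.reverse]
  | cur, c :: cs =>
    if p c then (if cur = [] then pvTok p [] cs else cur.reverse :: pvTok p [] cs)
    else pvTok p (c :: cur) cs

-- ---- character-class facts ----
theorem pv_isspace_lower (c : Char) :
    PySem.Chars.isspace (PySem.Chars.lowerChar c) = PySem.Chars.isspace c := by
  unfold PySem.Chars.lowerChar PySem.Chars.isupper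
  split_ifs with h
  · have hA : 65 ≤ c.toNat ∧ c.toNat ≤ 90 := by
      simp only [Bool.and_eq_true, decide_eq_true_eq] at h
      exact ⟨h.1, h.2⟩
    have hv : (c.toNat + 32).isValidChar := Or.inl (by omega)
    have ht : (Char.ofNat (c.toNat + 32)).toNat = c.toNat + 32 := by
      rw [Char.toNat_ofNat, if_pos hv]
    simp only [PySem.Chars.isspace, ht]
    rw [Bool.eq_iff_iff]
    simp only [Bool.or_eq_true, Bool.and_eq_true, decide_eq_true_eq]
    omega
  · rfl

theorem pv_isCS_lower (c : Char) : pvIsCS (PySem.Chars.lowerChar c) = pvIsCS c := by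
  unfold PySem.Chars.lowerChar PySem.Chars.isupper
  split_ifs with h
  · have hA : 65 ≤ c.toNat ∧ c.toNat ≤ 90 := by
      simp only [Bool.and_eq_true, decide_eq_true_eq] at h
      exact ⟨h.1, h.2⟩
    have hv : (c.toNat + 32).isValidChar := Or.inl (by omega)
    have ht : (Char.ofNat (c.toNat + 32)).toNat = c.toNat + 32 := by
      rw [Char.toNat_ofNat, if_pos hv]
    have hcomma : (',').toNat = 44 := rfl
    have hsemi : (';').toNat = 59 := rfl
    rw [Bool.eq_iff_iff]
    simp only [pvIsCS, Bool.or_eq_true, beq_iff_eq]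
    constructor
    · rintro (e | e) <;> { have := congrArg Char.toNat e; rw [ht] at this; omega }
    · rintro (e | e) <;> { have := congrArg Char.toNat e; omega }
  · rfl

theorem pv_delim_eq (c : Char) : pvIsDelim c = (pvIsCS c || PySem.Chars.isspace c) := by
  simp [pvIsDelim, pvIsCS, Bool.or_assoc]

theorem pv_delim_lower (c : Char) : pvIsDelim (PySem.Chars.lowerChar c) = pvIsDelim c := by
  simp [pv_delim_eq, pv_isCS_lower, pv_isspace_lower]

theorem pv_swap_eq_isCS (c : Char) : (pvSwap c == ',') = pvIsCS c := by
  unfold pvSwap pvIsCS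
  by_cases h : c = ';'
  · subst h; decide
  · simp [h]

-- ---- pvTok basic lemmas ----
theorem pvTok_all_delim (p : Char → Bool) (l : List Char) (h : l.all p) :
    ∀ cur, pvTok p cur l = if cur = [] then [] else [cur.reverse] := by
  induction l with
  | nil => intro cur; simp [pvTok]
  | cons c cs ih =>
    intro cur
    simp only [List.all_cons, Bool.and_eq_true] at h
    have := ih h.2
    simp [pvTok, h.1, this]

theorem pvTok_append_all (p : Char → Bool) (b : List Char) (hb : b.all p) :
    ∀ l cur, pvTok p cur (l ++ b) = pvTok p cur l := by
  intro l
  induction l with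
  | nil =>
    intro cur
    simpa [pvTok] using pvTok_all_delim p b hb cur
  | cons c cs ih =>
    intro cur
    simp only [List.cons_append, pvTok]
    split_ifs <;> simp [ih]

theorem pvTok_prepend_all (p : Char → Bool) (a : List Char) (ha : a.all p) (l : List Char) :
    pvTok p [] (a ++ l) = pvTok p [] l := by
  induction a with
  | nil => rfl
  | cons c cs ih =>
    simp only [List.all_cons, Bool.and_eq_true] at ha
    simp [pvTok, ha.1, ih ha.2]

theorem pvTok_absorb (p : Char → Bool) (x : List Char) (hx : x.all (fun c => !p c)) :
    ∀ cur rest, pvTok p cur (x ++ rest) = pvTok p (x.reverse ++ cur) rest := by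
  induction x with
  | nil => intro cur rest; simp
  | cons c cs ih =>
    intro cur rest
    simp only [List.all_cons, Bool.and_eq_true, Bool.not_eq_true'] at hx
    simp [pvTok, hx.1, ih (by simpa using hx.2)]

theorem pvTok_run (p : Char → Bool) (l : List Char) (hl : l.all (fun c => !p c)) (cur : List Char) :
    pvTok p cur l = if cur = [] ∧ l = [] then [] else [cur.reverse ++ l] := by
  have h1 : pvTok p cur (l ++ []) = pvTok p (l.reverse ++ cur) [] := pvTok_absorb p l hl cur []
  simp only [List.append_nil] at h1
  rw [h1]
  simp only [pvTok, List.append_eq_nil_iff, List.reverse_eq_nil_iff]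
  split_ifs with h₁ h₂ h₂
  · rfl
  · exact absurd ⟨h₁.2, h₁.1⟩ h₂
  · exact absurd ⟨h₂.2, h₂.1⟩ h₁
  · simp

theorem pvTok_ne_nil (p : Char → Bool) :
    ∀ l cur t, t ∈ pvTok p cur l → t ≠ [] := by
  intro l
  induction l with
  | nil =>
    intro cur t ht
    simp only [pvTok] at ht
    split_ifs at ht with h
    · simp at ht
    · simp only [List.mem_singleton] at ht
      subst ht
      simpa using h
  | cons c cs ih =>
    intro cur t ht
    simp only [pvTok] at ht
    split_ifs at ht with h₁ h₂
    · exact ih [] t ht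
    · rcases List.mem_cons.mp ht with h | h
      · subst h; simpa using h₂
      · exact ih [] t h
    · exact ih (c :: cur) t ht

-- ---- characterizations of the PySem primitives A uses ----
theorem pv_split₀_go (l : List Char) :
    ∀ cur acc, PySem.Chars.split₀.go l cur acc =
      acc.reverse ++ pvTok PySem.Chars.isspace cur l := by
  induction l with
  | nil =>
    intro cur acc
    simp only [PySem.Chars.split₀.go, pvTok, List.isEmpty_iff]
    split_ifs <;> simp
  | cons c cs ih =>
    intro cur acc
    simp only [PySem.Chars.split₀.go, pvTok, List.isEmpty_iff]
    split_ifs with h₁ h₂ <;> simp [ih]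

theorem pv_split₀_eq (l : List Char) :
    PySem.Chars.split₀ l = pvTok PySem.Chars.isspace [] l := by
  simpa [PySem.Chars.split₀] using pv_split₀_go l [] []

theorem pv_replace_go (fuel : Nat) :
    ∀ l acc, l.length ≤ fuel →
      PySem.Chars.replace.go [';'] [','] fuel l acc = acc.reverse ++ l.map pvSwap := by
  induction fuel with
  | zero =>
    intro l acc h
    have : l = [] := by cases l <;> simp_all
    subst this
    simp [PySem.Chars.replace.go]
  | succ n ih =>
    intro l acc h
    match l with
    | [] => simp [PySem.Chars.replace.go]
    | c :: t =>
      simp only [PySem.Chars.replace.go]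
      by_cases hc : c = ';'
      · subst hc
        have hp : [';'].isPrefixOf (';' :: t) = true := by simp [List.isPrefixOf]
        rw [if_pos hp]
        simp only [List.length_cons] at h
        rw [ih _ _ (by simpa using Nat.le_of_succ_le_succ h)]
        simp [pvSwap]
      · have hp : [';'].isPrefixOf (c :: t) = false := by
          simp [List.isPrefixOf]; exact fun e => hc e.symm
        rw [if_neg (by simp [hp])]
        simp only [List.length_cons] at h
        rw [ih _ _ (Nat.le_of_succ_le_succ h)]
        simp [pvSwap, hc]

theorem pv_replace_eq (l : List Char) :
    PySem.Chars.replace l [';'] [','] = l.map pvSwap := by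
  simpa [PySem.Chars.replace] using pv_replace_go l.length l [] (le_refl _)

theorem pv_splitOn_go (fuel : Nat) :
    ∀ l cur acc h t, l.length ≤ fuel → List.splitOnP (· == ',') l = h :: t →
      PySem.Chars.splitOn.go [','] fuel l cur acc =
        acc.reverse ++ (cur.reverse ++ h) :: t := by
  induction fuel with
  | zero =>
    intro l cur acc h t hlen hsp
    have : l = [] := by cases l <;> simp_all
    subst this
    simp only [List.splitOnP_nil] at hsp
    cases hsp
    simp [PySem.Chars.splitOn.go]
  | succ n ih =>
    intro l cur acc h t hlen hsp
    match l with
    | [] =>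
      simp only [List.splitOnP_nil] at hsp
      cases hsp
      simp [PySem.Chars.splitOn.go]
    | c :: rest =>
      simp only [List.length_cons] at hlen
      have hlen' := Nat.le_of_succ_le_succ hlen
      rw [List.splitOnP_cons] at hsp
      simp only [PySem.Chars.splitOn.go]
      by_cases hc : c = ','
      · subst hc
        rw [if_pos (by simp [List.isPrefixOf])]
        have hd : List.drop ([','] : List Char).length (',' :: rest) = rest := rfl
        rw [hd]
        rw [if_pos (by simp)] at hsp
        obtain ⟨h', t', hsp'⟩ : ∃ h' t', List.splitOnP (· == ',') rest = h' :: t' :=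
          List.exists_cons_of_ne_nil (List.splitOnP_ne_nil _ rest)
        rw [hsp'] at hsp
        obtain ⟨rfl, rfl⟩ := List.cons_eq_cons.mp hsp.symm
        rw [ih rest [] (cur.reverse :: acc) _ _ hlen' hsp']
        simp
      · rw [if_neg (by simp [List.isPrefixOf]; exact fun e => hc e.symm)]
        rw [if_neg (by simp [hc])] at hsp
        obtain ⟨h', t', hsp'⟩ : ∃ h' t', List.splitOnP (· == ',') rest = h' :: t' :=
          List.exists_cons_of_ne_nil (List.splitOnP_ne_nil _ rest)
        rw [hsp', List.modifyHead_cons] at hsp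
        obtain ⟨rfl, rfl⟩ := List.cons_eq_cons.mp hsp.symm
        rw [ih rest (c :: cur) acc _ _ hlen' hsp']
        simp

theorem pv_splitOn_eq (l : List Char) :
    PySem.Chars.splitOn l [','] = List.splitOnP (· == ',') l := by
  obtain ⟨h, t, hsp⟩ := List.exists_cons_of_ne_nil (List.splitOnP_ne_nil (· == ',') l)
  rw [PySem.Chars.splitOn, pv_splitOn_go (l.length + 1) l [] [] h t (by omega) hsp, hsp]
  simp

-- every piece of splitOnP contains no delimiter char
theorem pv_splitOnP_pieces (p : Char → Bool) :
    ∀ l piece, piece ∈ List.splitOnP p l → piece.all (fun c => !p c) := by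
  intro l
  induction l with
  | nil => intro piece h; simp only [List.splitOnP_nil, List.mem_singleton] at h; subst h; simp
  | cons c cs ih =>
    intro piece h
    rw [List.splitOnP_cons] at h
    split_ifs at h with hc
    · rcases List.mem_cons.mp h with rfl | h
      · simp
      · exact ih piece h
    · obtain ⟨h', t', hsp'⟩ := List.exists_cons_of_ne_nil (List.splitOnP_ne_nil p cs)
      rw [hsp', List.modifyHead_cons] at h
      rcases List.mem_cons.mp h with rfl | h
      · have hh : h' ∈ List.splitOnP p cs := by rw [hsp']; exact List.mem_cons_self
        have := ih h' hh
        simp only [List.all_cons, Bool.and_eq_true, Bool.not_eq_true']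
        exact ⟨by simp [hc], this⟩
      · exact ih piece (by rw [hsp']; exact List.mem_cons_of_mem _ h)

theorem pv_splitOnP_map (p : Char → Bool) (f : Char → Char) :
    ∀ l, List.splitOnP p (l.map f) = (List.splitOnP (fun c => p (f c)) l).map (List.map f) := by
  intro l
  induction l with
  | nil => simp
  | cons c cs ih =>
    simp only [List.map_cons, List.splitOnP_cons, ih]
    by_cases hc : p (f c)
    · simp [hc]
    · simp only [hc, if_neg, Bool.false_eq_true, not_false_iff]
      obtain ⟨h', t', hsp'⟩ := List.exists_cons_of_ne_nil (List.splitOnP_ne_nil (fun c => p (f c)) cs)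
      rw [hsp']
      simp

-- strip decomposes a string into spaces ++ core ++ spaces
theorem pv_strip_decomp (s : List Char) :
    ∃ a b, s = a ++ PySem.Chars.strip s ++ b ∧
      a.all PySem.Chars.isspace ∧ b.all PySem.Chars.isspace := by
  refine ⟨s.takeWhile PySem.Chars.isspace,
    ((PySem.Chars.lstrip s).reverse.takeWhile PySem.Chars.isspace).reverse, ?_,
    List.all_takeWhile, by simpa only [List.all_reverse] using List.all_takeWhile⟩
  have h2 : PySem.Chars.lstrip s =
      PySem.Chars.strip s ++ ((PySem.Chars.lstrip s).reverse.takeWhile PySem.Chars.isspace).reverse := by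
    simp only [PySem.Chars.strip, PySem.Chars.rstrip]
    rw [← List.reverse_append]
    conv_lhs => rw [← List.reverse_reverse (PySem.Chars.lstrip s)]
    rw [List.takeWhile_append_dropWhile]
  calc s = s.takeWhile PySem.Chars.isspace ++ PySem.Chars.lstrip s := by
        simp only [PySem.Chars.lstrip]; rw [List.takeWhile_append_dropWhile]
    _ = _ := by
        conv_lhs => rw [h2]
        rw [List.append_assoc]

-- tokenizing (the lowering of) a string ignores strip
theorem pv_all_isspace_map (a : List Char) (ha : a.all PySem.Chars.isspace) :
    (a.map PySem.Chars.lowerChar).all PySem.Chars.isspace := by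
  simp only [List.all_map, List.all_eq_true] at *
  intro c hc
  simpa [Function.comp, pv_isspace_lower] using ha c hc

theorem pv_tok_lower_strip (s : List Char) :
    pvTok PySem.Chars.isspace [] ((PySem.Chars.strip s).map PySem.Chars.lowerChar) =
      pvTok PySem.Chars.isspace [] (s.map PySem.Chars.lowerChar) := by
  obtain ⟨a, b, hs, ha, hb⟩ := pv_strip_decomp s
  conv_rhs => rw [hs]
  simp only [List.map_append]
  rw [List.append_assoc,
    pvTok_prepend_all _ _ (pv_all_isspace_map a ha),
    pvTok_append_all _ _ (pv_all_isspace_map b hb)]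

-- ---- the master lemma: A's nested splits = one scan over the delimiter class ----
theorem pv_master (w : List Char) :
    ∀ cur h t, cur.all (fun c => !pvIsDelim c) → List.splitOnP pvIsCS w = h :: t →
      List.flatMap (pvTok PySem.Chars.isspace []) ((cur.reverse ++ h) :: t) =
        pvTok pvIsDelim cur w := by
  induction w with
  | nil =>
    intro cur h t hcur hsp
    simp only [List.splitOnP_nil] at hsp
    cases hsp
    have hcur' : cur.reverse.all (fun c => !PySem.Chars.isspace c) := by
      simp only [List.all_reverse, List.all_eq_true] at *
      intro c hc
      have := hcur c hc
      simp only [pv_delim_eq, Bool.not_eq_true', Bool.or_eq_false_iff] at this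
      simp [this.2]
    simp only [List.flatMap_cons, List.flatMap_nil, List.append_nil]
    rw [pvTok_run _ _ hcur']
    simp only [pvTok, List.reverse_eq_nil_iff]
    split_ifs with h1 h2 h2 <;> simp_all
  | cons c cs ih =>
    intro cur h t hcur hsp
    rw [List.splitOnP_cons] at hsp
    have hnd : ∀ cur' : List Char, cur'.all (fun c => !pvIsDelim c) →
        cur'.reverse.all (fun c => !PySem.Chars.isspace c) := by
      intro cur' hc
      simp only [List.all_reverse, List.all_eq_true] at *
      intro d hd
      have := hc d hd
      simp only [pv_delim_eq, Bool.not_eq_true', Bool.or_eq_false_iff] at this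
      simp [this.2]
    by_cases hcs : pvIsCS c
    · rw [if_pos hcs] at hsp
      obtain ⟨h', t', hsp'⟩ := List.exists_cons_of_ne_nil (List.splitOnP_ne_nil pvIsCS cs)
      rw [hsp'] at hsp
      obtain ⟨rfl, rfl⟩ := List.cons_eq_cons.mp hsp.symm
      have hdelim : pvIsDelim c = true := by simp [pv_delim_eq, hcs]
      simp only [List.flatMap_cons, pvTok, hdelim, if_pos]
      simp only [List.append_nil]
      rw [pvTok_run _ _ (hnd cur hcur)]
      have hIH := ih [] _ _ (by simp) hsp'
      simp only [List.reverse_nil, List.nil_append, List.flatMap_cons] at hIH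
      split_ifs with h1 h2 h2
      · simpa [h1] using hIH
      · simp_all
      · simp_all
      · rw [← hIH]
        simp
    · rw [if_neg (by simp [hcs])] at hsp
      obtain ⟨h', t', hsp'⟩ := List.exists_cons_of_ne_nil (List.splitOnP_ne_nil pvIsCS cs)
      rw [hsp', List.modifyHead_cons] at hsp
      obtain ⟨rfl, rfl⟩ := List.cons_eq_cons.mp hsp.symm
      by_cases hsp_c : PySem.Chars.isspace c
      · have hdelim : pvIsDelim c = true := by simp [pv_delim_eq, hsp_c]
        simp only [List.flatMap_cons, pvTok, hdelim, if_pos]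
        have habs : pvTok PySem.Chars.isspace [] (cur.reverse ++ c :: h') =
            pvTok PySem.Chars.isspace cur (c :: h') := by
          rw [show cur.reverse ++ c :: h' = cur.reverse ++ (c :: h') from rfl]
          rw [pvTok_absorb _ _ (hnd cur hcur), List.reverse_reverse, List.append_nil]
        rw [habs]
        simp only [pvTok, hsp_c, if_pos]
        have hIH := ih [] _ _ (by simp) hsp'
        simp only [List.reverse_nil, List.nil_append, List.flatMap_cons] at hIH
        split_ifs with h1
        · simpa [h1] using hIH
        · rw [← hIH]; simp
      · have hdelim : pvIsDelim c = false := by simp [pv_delim_eq, hcs, hsp_c]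
        simp only [List.flatMap_cons, pvTok, hdelim]
        simp only [Bool.false_eq_true, if_false]
        have hIH := ih (c :: cur) _ _ (by simp [hdelim, hcur]) hsp'
        simp only [List.flatMap_cons, List.reverse_cons] at hIH
        rw [← hIH]
        simp

-- ---- B's foldl computes pvTok ----

-- ---- B's foldl computes pvTok ----
theorem pv_foldlB (l : List Char) :
    ∀ toks cur,
      (let fin := l.foldl
        (fun (st : List String × List Char) ch =>
          if pvIsDelim ch then
            (if st.2 = [] then st else (st.1 ++ [String.ofList st.2], ([] : List Char)))
          else (st.1, st.2 ++ [PySem.Chars.lowerChar ch]))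
        (toks, cur);
       if fin.2 = [] then fin.1 else fin.1 ++ [String.ofList fin.2]) =
      toks ++ (pvTok pvIsDelim cur.reverse (l.map PySem.Chars.lowerChar)).map String.ofList := by
  induction l with
  | nil =>
    intro toks cur
    simp only [List.foldl_nil, List.map_nil, pvTok, List.reverse_reverse, List.reverse_eq_nil_iff]
    split_ifs with h1 <;> simp
  | cons c cs ih =>
    intro toks cur
    by_cases hd : pvIsDelim c
    · by_cases hc : cur = []
      · subst hc
        simp only [List.foldl_cons, List.map_cons, pvTok, pv_delim_lower, hd, if_true,
          List.reverse_nil]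
        simpa using ih toks []
      · simp only [List.foldl_cons, List.map_cons, pvTok, pv_delim_lower, hd, if_true, hc,
          if_false, List.reverse_eq_nil_iff]
        simpa using ih (toks ++ [String.ofList cur]) []
    · simp only [List.foldl_cons, List.map_cons, pvTok, pv_delim_lower, hd, if_false,
        Bool.false_eq_true]
      have := ih toks (cur ++ [PySem.Chars.lowerChar c])
      simp only [List.reverse_append, List.reverse_cons, List.reverse_nil, List.nil_append,
        List.singleton_append] at this
      simpa using this

-- ---- glue lemmas on the String level ----
theorem pv_B_eq (v : String) (hv : ¬ v = "") :
    parse_backend_list_py_alt (some v) =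
      (pvTok pvIsDelim [] (v.toList.map PySem.Chars.lowerChar)).map String.ofList := by
  simp only [parse_backend_list_py_alt, if_neg hv]
  simpa using pv_foldlB v.toList [] []

theorem pv_all_delim_of_space (l : List Char) (h : l.all PySem.Chars.isspace) :
    l.all pvIsDelim := by
  simp only [List.all_eq_true] at *
  intro c hc
  simp [pv_delim_eq, h c hc]

theorem pv_strip_toList (v : String) :
    (PySem.Str.lower (PySem.Str.strip v)).toList =
      (PySem.Chars.strip v.toList).map PySem.Chars.lowerChar := by
  simp [PySem.Str.toList_lower, PySem.Str.toList_strip, PySem.Chars.lower]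

-- when the stripped string is all, the scan returns exactly ["all"]
theorem pv_all_case (v : String)
    (hall : (PySem.Str.lower (PySem.Str.strip v)) = "all") :
    (pvTok pvIsDelim [] (v.toList.map PySem.Chars.lowerChar)).map String.ofList = ["all"] := by
  have hl : (PySem.Chars.strip v.toList).map PySem.Chars.lowerChar = ['a', 'l', 'l'] := by
    rw [← pv_strip_toList, hall]
    rfl
  obtain ⟨a, b, hs, ha, hb⟩ := pv_strip_decomp v.toList
  have hw : v.toList.map PySem.Chars.lowerChar =
      (a.map PySem.Chars.lowerChar) ++ (['a', 'l', 'l'] ++ b.map PySem.Chars.lowerChar) := by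
    conv_lhs => rw [hs]
    simp [hl]
  rw [hw,
    pvTok_prepend_all _ _ (pv_all_delim_of_space _ (pv_all_isspace_map a ha)),
    pvTok_append_all _ _ (pv_all_delim_of_space _ (pv_all_isspace_map b hb)),
    pvTok_run _ _ (by decide)]
  rfl

-- when the stripped string is empty, the scan returns []
theorem pv_empty_case (v : String)
    (hemp : PySem.Str.lower (PySem.Str.strip v) = "") :
    (pvTok pvIsDelim [] (v.toList.map PySem.Chars.lowerChar)).map String.ofList = [] := by
  have hl : (PySem.Chars.strip v.toList).map PySem.Chars.lowerChar = [] := by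
    rw [← pv_strip_toList, hemp]; rfl
  have hstrip : PySem.Chars.strip v.toList = [] := by simpa using hl
  obtain ⟨a, b, hs, ha, hb⟩ := pv_strip_decomp v.toList
  rw [hstrip, List.append_nil] at hs
  have hsp : (v.toList.map PySem.Chars.lowerChar).all pvIsDelim := by
    rw [hs]
    simp only [List.map_append, List.all_append, Bool.and_eq_true]
    exact ⟨pv_all_delim_of_space _ (pv_all_isspace_map a ha),
      pv_all_delim_of_space _ (pv_all_isspace_map b hb)⟩
  rw [pvTok_all_delim _ _ hsp []]
  simp

-- A's general path computes the scan
set_option maxHeartbeats 1000000 in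
theorem pv_A_main (v : String) :
    ((((PySem.Str.split? (PySem.Str.replace v ";" ",") ",").getD []).map
        (fun item => PySem.Str.lower (PySem.Str.strip item))).foldl
      (fun acc item => acc ++ (PySem.Str.split₀ item).filter (fun part => part ≠ "")) []).filter
        (fun item => item ≠ "") =
      (pvTok pvIsDelim [] (v.toList.map PySem.Chars.lowerChar)).map String.ofList := by
  -- step 1: the split? of the swapped string
  have h1 : (PySem.Str.replace v ";" ",").toList = v.toList.map pvSwap := by
    rw [PySem.Str.toList_replace]
    exact pv_replace_eq v.toList
  have h2 : PySem.Str.split? (PySem.Str.replace v ";" ",") "," =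
      some ((List.splitOnP pvIsCS v.toList).map String.ofList) := by
    simp only [PySem.Str.split?, PySem.Chars.split?, h1]
    rw [if_neg (by decide)]
    have : PySem.Chars.splitOn (v.toList.map pvSwap) (",".toList) =
        List.splitOnP pvIsCS v.toList := by
      rw [show (",".toList) = [','] from rfl, pv_splitOn_eq, pv_splitOnP_map]
      have hfun : (fun c => pvSwap c == ',') = pvIsCS := funext pv_swap_eq_isCS
      rw [hfun]
      refine (List.map_congr_left ?_).trans (List.map_id _)
      intro piece hp
      have hall := pv_splitOnP_pieces pvIsCS v.toList piece hp
      refine (List.map_congr_left ?_).trans (List.map_id _)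
      intro c hc
      simp only [List.all_eq_true] at hall
      have hcs := hall c hc
      simp only [pvIsCS, Bool.not_eq_true', Bool.or_eq_false_iff, beq_eq_false_iff_ne] at hcs
      simp [pvSwap, hcs.2]
    rw [this]
    rfl
  rw [h2]
  simp only [Option.getD_some, List.map_map]
  rw [PySem.List.foldl_append_eq_flatMap, List.nil_append, List.flatMap_map]
  -- step 2: per piece, split₀/strip/lower is the whitespace tokenizer of the lowered piece
  have h3 : ∀ piece : List Char,
      List.filter (fun part => decide (part ≠ ""))
        (PySem.Str.split₀ (PySem.Str.lower (PySem.Str.strip (String.ofList piece)))) =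
      (pvTok PySem.Chars.isspace [] (piece.map PySem.Chars.lowerChar)).map String.ofList := by
    intro piece
    simp only [PySem.Str.split₀]
    have htl : (PySem.Str.lower (PySem.Str.strip (String.ofList piece))).toList =
        (PySem.Chars.strip piece).map PySem.Chars.lowerChar := by
      rw [pv_strip_toList, String.toList_ofList]
    rw [htl, pv_split₀_eq, pv_tok_lower_strip]
    rw [List.filter_map]
    refine congrArg _ (List.filter_eq_self.mpr ?_)
    intro t ht
    have := pvTok_ne_nil PySem.Chars.isspace _ _ t ht
    simp only [Function.comp_apply, ne_eq, decide_eq_true_eq]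
    intro hcon
    exact this (by simpa using congrArg String.toList hcon)
  have h4 : (List.splitOnP pvIsCS v.toList).flatMap
      (fun a => List.filter (fun part => decide (part ≠ ""))
        (PySem.Str.split₀ (PySem.Str.lower (PySem.Str.strip (String.ofList a))))) =
      ((List.splitOnP pvIsCS v.toList).flatMap
        (fun piece => pvTok PySem.Chars.isspace [] (piece.map PySem.Chars.lowerChar))).map
          String.ofList := by
    rw [List.map_flatMap]
    exact List.flatMap_congr (fun piece _ => h3 piece)
  simp only [Function.comp_apply]
  rw [h4]
  -- step 3: move the lowering inside out and apply the master lemma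
  have h5 : (List.splitOnP pvIsCS v.toList).flatMap
      (fun piece => pvTok PySem.Chars.isspace [] (piece.map PySem.Chars.lowerChar)) =
      (List.splitOnP pvIsCS (v.toList.map PySem.Chars.lowerChar)).flatMap
        (pvTok PySem.Chars.isspace []) := by
    rw [pv_splitOnP_map]
    rw [show (fun c => pvIsCS (PySem.Chars.lowerChar c)) = pvIsCS from funext pv_isCS_lower]
    rw [List.flatMap_map]
  rw [h5]
  obtain ⟨h, t, hsp⟩ := List.exists_cons_of_ne_nil
    (List.splitOnP_ne_nil pvIsCS (v.toList.map PySem.Chars.lowerChar))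
  rw [hsp]
  have := pv_master (v.toList.map PySem.Chars.lowerChar) [] h t (by simp) hsp
  simp only [List.reverse_nil, List.nil_append] at this
  rw [this]
  -- step 4: the outer filter keeps everything
  apply List.filter_eq_self.mpr
  intro s hs
  simp only [List.mem_map] at hs
  obtain ⟨tk, htk, rfl⟩ := hs
  have := pvTok_ne_nil pvIsDelim _ _ tk htk
  simp only [ne_eq, decide_eq_true_eq]
  intro hcon
  exact this (by simpa using congrArg String.toList hcon)

-- ===== VERDICT (by name: the statement is the Claim_ definition above) =====
theorem parse_backend_list_py_spec : Claim_equal_parse_backend_list_py := by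
  intro value _
  unfold Spec_parse_backend_list_py
  match value with
  | none => rfl
  | some v =>
    by_cases hv : v = ""
    · subst hv; rfl
    · rw [pv_B_eq v hv]
      simp only [parse_backend_list_py, if_neg hv]
      by_cases hemp : PySem.Str.lower (PySem.Str.strip v) = ""
      · rw [if_pos hemp, pv_empty_case v hemp]
      · rw [if_neg hemp]
        by_cases hall : PySem.Str.lower (PySem.Str.strip v) = "all"
        · rw [if_pos hall, pv_all_case v hall]
        · rw [if_neg hall]
          exact pv_A_main v
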